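-- pv_equiv track=rewrite | github.com/KarloHasnek/Algoritmi-i-Strukture-podataka | Labovi/Lab5/lab5.py | formatiraj_izlaz
-- ===== SOURCE A (Python) =====
-- from string import punctuation
--
-- def formatiraj_izlaz(frekvencije):
--     simboli = []
--     slova = []
--     for znak, frekvencija in frekvencije.items():
--         if znak in punctuation:
--             simboli.append((znak, frekvencija))
--         else:
--             slova.append((znak, frekvencija))
--
--     simboli.sort()
--     slova.sort()
--
--     izlaz = ""
--     for znak, frekvencija in simboli + slova:
--         izlaz += f"Character {znak} occurs {frekvencija} times.\n"
--     return izlaz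
-- ===== SOURCE B (Python) =====
-- from string import punctuation
--
-- def formatiraj_izlaz(frekvencije):
--     items = sorted(frekvencije.items(), key=lambda kv: (kv[0] not in punctuation, kv))
--     return "".join(f"Character {znak} occurs {frekvencija} times.\n" for znak, frekvencija in items)
-- ===== Notes on version B (the rewrite author's own statement) =====
-- stated objective: simpler
-- what changed: Replaces the two-bucket partition, two separate in-place sorts and a string-accumulating loop by a single sort under the composite key (key not in punctuation, item) followed by one join.
import Mathlib
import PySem

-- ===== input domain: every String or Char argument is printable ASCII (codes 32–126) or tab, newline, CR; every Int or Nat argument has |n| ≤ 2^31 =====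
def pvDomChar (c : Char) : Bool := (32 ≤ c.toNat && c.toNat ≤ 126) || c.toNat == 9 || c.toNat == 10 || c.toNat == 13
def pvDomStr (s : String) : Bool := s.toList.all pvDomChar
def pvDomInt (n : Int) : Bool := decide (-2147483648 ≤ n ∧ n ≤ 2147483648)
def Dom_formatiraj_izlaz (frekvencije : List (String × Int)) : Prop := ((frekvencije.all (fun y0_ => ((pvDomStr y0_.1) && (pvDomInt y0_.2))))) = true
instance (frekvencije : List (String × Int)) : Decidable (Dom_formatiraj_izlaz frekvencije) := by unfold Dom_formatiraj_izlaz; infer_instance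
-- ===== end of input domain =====

-- B differs from A only in decomposition: one keyed sort plus a join instead of a
-- two-bucket partition, two sorts and a string-accumulating loop (objective: simpler).

-- string.punctuation (shared constant of both Python sources)
def pvPunctuation : String := "!\"#$%&'()*+,-./:;<=>?@[\\]^_`{|}~"

-- f"Character {znak} occurs {frekvencija} times.\n" (the identical f-string of both sources)
def pvFmtLine (p : String × Int) : String :=
  "Character " ++ p.1 ++ " occurs " ++ PySem.Int.toStr p.2 ++ " times.\n"

-- ===== PORT A =====
def formatiraj_izlaz (frekvencije : List (String × Int)) : String :=
  -- simboli/slova appended in one pass over .items()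
  let st := frekvencije.foldl
    (fun (st : List (String × Int) × List (String × Int)) p =>
      if PySem.Str.isIn p.1 pvPunctuation then (st.1 ++ [p], st.2) else (st.1, st.2 ++ [p]))
    ([], [])
  -- simboli.sort(); slova.sort()  — tuples compare (znak, frekvencija) lexicographically
  let simboli := PySem.List.sorted2 st.1 (fun p => p.1) (fun p => p.2)
  let slova := PySem.List.sorted2 st.2 (fun p => p.1) (fun p => p.2)
  -- izlaz += f"..." over simboli + slova
  (simboli ++ slova).foldl (fun izlaz p => izlaz ++ pvFmtLine p) ""

-- ===== PORT B =====
-- key=lambda kv: (kv[0] not in punctuation, kv): a 2-tuple key (bool→0/1, then the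
-- item pair compared lexicographically), so sorted(...) is PySem.List.sorted2
def formatiraj_izlaz_alt (frekvencije : List (String × Int)) : String :=
  PySem.Str.join "" ((PySem.List.sorted2 frekvencije
      (fun kv => if PySem.Str.isIn kv.1 pvPunctuation then (0 : Nat) else 1)
      (fun kv => toLex kv)).map pvFmtLine)

-- ===== PRECONDITION & SPEC =====
def Spec_formatiraj_izlaz (frekvencije : List (String × Int)) (out : String) : Prop := out = formatiraj_izlaz_alt frekvencije
instance (frekvencije : List (String × Int)) (out : String) : Decidable (Spec_formatiraj_izlaz frekvencije out) := by unfold Spec_formatiraj_izlaz; infer_instance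

-- ===== CLAIM (what is proved, stated in full; the proofs are below) =====
def Claim_equal_formatiraj_izlaz : Prop := ∀ (frekvencije : List (String × Int)), Dom_formatiraj_izlaz frekvencije → Spec_formatiraj_izlaz frekvencije (formatiraj_izlaz frekvencije)

-- ===== LEMMAS AND PROOFS =====

-- A's one-pass two-bucket fold is (filter P, filter !P)
theorem pvPartition_fold (l : List (String × Int))
    (s n : List (String × Int)) :
    l.foldl (fun (st : List (String × Int) × List (String × Int)) p =>
        if PySem.Str.isIn p.1 pvPunctuation then (st.1 ++ [p], st.2) else (st.1, st.2 ++ [p]))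
      (s, n)
    = (s ++ l.filter (fun p => PySem.Str.isIn p.1 pvPunctuation),
       n ++ l.filter (fun p => !PySem.Str.isIn p.1 pvPunctuation)) := by
  induction l generalizing s n with
  | nil => simp
  | cons x t ih =>
    simp only [List.foldl_cons, List.filter_cons]
    by_cases h : PySem.Str.isIn x.1 pvPunctuation = true
    · rw [if_pos h, ih, if_pos h, if_neg (by simpa using h)]
      simp
    · rw [if_neg h, ih, if_neg h, if_pos (by simpa using h)]
      simp

-- B's composite sort key, named for the proofs
def pvBKey (p : String × Int) : Lex (Nat × Lex (String × Int)) :=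
  toLex ((if PySem.Str.isIn p.1 pvPunctuation then 0 else 1), toLex p)

-- sorted2 with keys k1, k2 is sorted under the lexicographic combined key
theorem pvSorted2_eq_sorted_lex {α κ₁ κ₂ : Type} [LinearOrder κ₁] [LinearOrder κ₂]
    (xs : List α) (k1 : α → κ₁) (k2 : α → κ₂) :
    PySem.List.sorted2 xs k1 k2
      = PySem.List.sorted xs (fun x => toLex (k1 x, k2 x)) := by
  unfold PySem.List.sorted2 PySem.List.sorted
  simp only [if_neg (by decide : ¬ (false = true))]
  congr 1
  funext acc x
  congr 1
  funext a b
  by_cases h1 : k1 a < k1 b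
  · simp [h1, Prod.Lex.toLex_lt_toLex]
  · by_cases h2 : k1 b < k1 a
    · have : k1 a ≠ k1 b := by intro e; exact absurd (e ▸ h2) (lt_irrefl _)
      simp [h1, h2, Prod.Lex.toLex_lt_toLex, this]
    · have heq : k1 a = k1 b := le_antisymm (not_lt.mp h2) (not_lt.mp h1)
      simp [Prod.Lex.toLex_lt_toLex, heq]

theorem pvBKey_injective : Function.Injective pvBKey := by
  intro a b h
  unfold pvBKey at h
  have h2 := congrArg (fun x => (ofLex x).2) h
  simpa using h2

-- punctuation-first then item order: two sorted buckets concatenated = one keyed sort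
theorem pvSplitSort (xs : List (String × Int)) :
    PySem.List.sorted (xs.filter (fun p => PySem.Str.isIn p.1 pvPunctuation)) (fun p => toLex (p.1, p.2))
      ++ PySem.List.sorted (xs.filter (fun p => !PySem.Str.isIn p.1 pvPunctuation)) (fun p => toLex (p.1, p.2))
    = PySem.List.sorted xs pvBKey := by
  apply PySem.List.eq_of_perm_of_pairwise_le_of_injective pvBKey pvBKey_injective
  · exact ((PySem.List.sorted_perm _ _ _).append (PySem.List.sorted_perm _ _ _)).trans
      ((List.filter_append_perm _ xs).trans (PySem.List.sorted_perm _ _ _).symm)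
  · apply List.pairwise_append.mpr
    refine ⟨?_, ?_, ?_⟩
    · refine List.Pairwise.imp_of_mem ?_ (PySem.List.sorted_pairwise _ _)
      intro a b ha hb hle
      have hpa := List.of_mem_filter ((PySem.List.sorted_perm _ _ _).mem_iff.mp ha :
        a ∈ xs.filter (fun p => PySem.Str.isIn p.1 pvPunctuation))
      have hpb := List.of_mem_filter ((PySem.List.sorted_perm _ _ _).mem_iff.mp hb :
        b ∈ xs.filter (fun p => PySem.Str.isIn p.1 pvPunctuation))
      unfold pvBKey
      rw [Prod.Lex.toLex_le_toLex]
      refine Or.inr ⟨?_, hle⟩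
      simp only [PySem.Str.isIn_eq] at hpa hpb
      simp [hpa, hpb]
    · refine List.Pairwise.imp_of_mem ?_ (PySem.List.sorted_pairwise _ _)
      intro a b ha hb hle
      have hpa := List.of_mem_filter ((PySem.List.sorted_perm _ _ _).mem_iff.mp ha :
        a ∈ xs.filter (fun p => !PySem.Str.isIn p.1 pvPunctuation))
      have hpb := List.of_mem_filter ((PySem.List.sorted_perm _ _ _).mem_iff.mp hb :
        b ∈ xs.filter (fun p => !PySem.Str.isIn p.1 pvPunctuation))
      unfold pvBKey
      rw [Prod.Lex.toLex_le_toLex]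
      refine Or.inr ⟨?_, hle⟩
      simp only [PySem.Str.isIn_eq, Bool.not_eq_true'] at hpa hpb
      simp [hpa, hpb]
    · intro a ha b hb
      have hpa := List.of_mem_filter ((PySem.List.sorted_perm _ _ _).mem_iff.mp ha :
        a ∈ xs.filter (fun p => PySem.Str.isIn p.1 pvPunctuation))
      have hpb := List.of_mem_filter ((PySem.List.sorted_perm _ _ _).mem_iff.mp hb :
        b ∈ xs.filter (fun p => !PySem.Str.isIn p.1 pvPunctuation))
      unfold pvBKey
      rw [Prod.Lex.toLex_le_toLex]
      left
      simp only [PySem.Str.isIn_eq, Bool.not_eq_true'] at hpa hpb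
      simp [hpa, hpb]
  · exact PySem.List.sorted_pairwise _ _

theorem pvJoin_empty_cons (x : String) (xs : List String) :
    PySem.Str.join "" (x :: xs) = x ++ PySem.Str.join "" xs := by
  cases xs with
  | nil =>
    rw [← String.toList_inj]
    simp [PySem.Str.join, PySem.Chars.join, List.intercalate]
  | cons y ys =>
    rw [← String.toList_inj]
    simp [PySem.Str.join, PySem.Chars.join_cons_cons]

-- izlaz += line  over a list  =  acc ++ "".join(lines)
theorem pvFold_append_eq_join (l : List (String × Int)) (acc : String) :
    l.foldl (fun izlaz p => izlaz ++ pvFmtLine p) acc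
      = acc ++ PySem.Str.join "" (l.map pvFmtLine) := by
  induction l generalizing acc with
  | nil =>
    rw [← String.toList_inj]
    simp [PySem.Str.join, PySem.Chars.join, List.intercalate]
  | cons x t ih =>
    simp only [List.foldl_cons, List.map_cons, ih, pvJoin_empty_cons]
    rw [← String.toList_inj]
    simp

-- ===== VERDICT (by name: the statement is the Claim_ definition above) =====
theorem formatiraj_izlaz_spec : Claim_equal_formatiraj_izlaz := by
  intro xs _
  unfold Spec_formatiraj_izlaz formatiraj_izlaz formatiraj_izlaz_alt
  rw [pvPartition_fold]
  simp only [List.nil_append]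
  rw [pvSorted2_eq_sorted_lex, pvSorted2_eq_sorted_lex, pvSorted2_eq_sorted_lex,
      pvSplitSort, pvFold_append_eq_join]
  have hk : pvBKey = fun x : String × Int =>
      toLex ((if PySem.Chars.isIn x.1.toList pvPunctuation.toList then (0 : Nat) else 1), toLex x) := by
    funext p
    simp [pvBKey]
  rw [← String.toList_inj]
  simp only [hk]
  congr 1
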